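-- pv_equiv track=rewrite | github.com/Tusenka/hackerrank | informatics/books.py | _find_next_max
-- ===== SOURCE A (Python) =====
-- def _find_next_max(a, j, sign):
--     _max=a[j]
--     while j<len(a) and a[j]*sign>0:
--         if a[j]>_max:
--             _max=a[j]
--         j+=1
--     if j==len(a)-1 and a[-1]*sign>0:
--         return -1, _max
--     return j, _max
-- ===== SOURCE B (Python) =====
-- def _find_next_max(a, j, sign):
--     # recursive decomposition: the same-sign run is consumed by structural
--     # recursion that returns (end, max-of-run or None when the run is empty);
--     # A's "-1" branch is dropped (it is dead: the loop only stops where the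
--     # sign test fails or at len(a)).
--     x = a[j]
--     end, m = _run_max(a, j, sign)
--     return end, (x if m is None else m)
--
--
-- def _run_max(a, j, sign):
--     if j >= len(a) or a[j] * sign <= 0:
--         return j, None
--     end, m = _run_max(a, j + 1, sign)
--     x = a[j]
--     return end, (x if m is None or x > m else m)
-- ===== Notes on version B (the rewrite author's own statement) =====
-- stated objective: alternative
-- what changed: B replaces A's iterative fused while-loop (mutable j and running _max) with a structural recursion over the run that returns (end, optional run-max) and combines the results on the way back, and drops A's provably dead 'return -1' branch.
import Mathlib
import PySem

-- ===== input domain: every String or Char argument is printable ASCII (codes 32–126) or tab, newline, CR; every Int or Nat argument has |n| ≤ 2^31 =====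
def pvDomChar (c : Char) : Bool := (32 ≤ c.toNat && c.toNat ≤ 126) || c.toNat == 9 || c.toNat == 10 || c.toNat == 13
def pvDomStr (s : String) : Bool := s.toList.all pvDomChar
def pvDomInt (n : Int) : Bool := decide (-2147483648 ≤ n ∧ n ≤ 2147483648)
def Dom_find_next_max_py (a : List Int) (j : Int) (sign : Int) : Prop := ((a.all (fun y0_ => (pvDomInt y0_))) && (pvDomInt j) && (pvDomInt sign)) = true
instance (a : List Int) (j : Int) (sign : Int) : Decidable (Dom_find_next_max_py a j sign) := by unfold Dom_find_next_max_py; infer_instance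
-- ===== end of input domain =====

-- B replaces A's iterative fused loop with a structural recursion returning
-- (end, optional run-max), and drops A's dead "-1" branch; objective: alternative.

-- ===== PORT A =====
-- A's while loop: state (j, _max); reads a[j] with Python indexing (pyGetD is exact
-- under Pre_, where every index read is in range).  The Nat fuel only makes the
-- recursion structural; with the fuel supplied at the call site the loop condition
-- always fails before the fuel runs out.
def pvLoopA (a : List Int) (sign : Int) : Nat → Int → Int → Int × Int
  | 0, j, m => (j, m)
  | fuel + 1, j, m =>
    if j < (a.length : Int) ∧ (PySem.List.pyGetD a j 0) * sign > 0 then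
      pvLoopA a sign fuel (j + 1)
        (if PySem.List.pyGetD a j 0 > m then PySem.List.pyGetD a j 0 else m)
    else (j, m)

def find_next_max_py (a : List Int) (j : Int) (sign : Int) : Int × Int :=
  if (pvLoopA a sign ((a.length : Int) - j).toNat j (PySem.List.pyGetD a j 0)).1
        = (a.length : Int) - 1 ∧ (PySem.List.pyGetD a (-1) 0) * sign > 0 then
    (-1, (pvLoopA a sign ((a.length : Int) - j).toNat j (PySem.List.pyGetD a j 0)).2)
  else pvLoopA a sign ((a.length : Int) - j).toNat j (PySem.List.pyGetD a j 0)

-- ===== PORT B =====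
-- B's _run_max: structural recursion (fuel = remaining indices) returning
-- (end, max of the run as Option Int; none for the empty run).  The early
-- "return j, None" branch comes first, as in Source B.
def pvRunB (a : List Int) (sign : Int) : Nat → Int → Int × Option Int
  | 0, j => (j, none)
  | fuel + 1, j =>
    if j ≥ (a.length : Int) ∨ (PySem.List.pyGetD a j 0) * sign ≤ 0 then (j, none)
    else
      ((pvRunB a sign fuel (j + 1)).1,
        some (match (pvRunB a sign fuel (j + 1)).2 with
              | none => PySem.List.pyGetD a j 0
              | some m =>
                if PySem.List.pyGetD a j 0 > m then PySem.List.pyGetD a j 0 else m))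

def find_next_max_py_alt (a : List Int) (j : Int) (sign : Int) : Int × Int :=
  ((pvRunB a sign ((a.length : Int) - j).toNat j).1,
    match (pvRunB a sign ((a.length : Int) - j).toNat j).2 with
    | none => PySem.List.pyGetD a j 0
    | some m => m)

-- ===== PRECONDITION & SPEC =====
-- Pre_ excludes exactly the inputs where Python A raises IndexError (initial a[j] out of range).
def Pre_find_next_max_py (a : List Int) (j : Int) (sign : Int) : Prop :=
  -(a.length : Int) ≤ j ∧ j < (a.length : Int)
instance (a : List Int) (j : Int) (sign : Int) : Decidable (Pre_find_next_max_py a j sign) := by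
  unfold Pre_find_next_max_py; infer_instance
def pvWitness_find_next_max_py : List Int × Int × Int := ([1, 2, -1], 0, 1)

def Spec_find_next_max_py (a : List Int) (j : Int) (sign : Int) (out : Int × Int) : Prop :=
  out = find_next_max_py_alt a j sign
instance (a : List Int) (j : Int) (sign : Int) (out : Int × Int) : Decidable (Spec_find_next_max_py a j sign out) := by
  unfold Spec_find_next_max_py; infer_instance

-- ===== CLAIM =====
def Claim_equal_find_next_max_py : Prop := ∀ (a : List Int) (j : Int) (sign : Int), Dom_find_next_max_py a j sign → Pre_find_next_max_py a j sign → Spec_find_next_max_py a j sign (find_next_max_py a j sign)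

-- ===== LEMMAS AND PROOFS =====

theorem pvRunB_fst_ge (a : List Int) (sign : Int) (fuel : Nat) (j : Int) :
    j ≤ (pvRunB a sign fuel j).1 := by
  induction fuel generalizing j with
  | zero => simp [pvRunB]
  | succ f ih =>
    rw [pvRunB]
    split
    · simp
    · have := ih (j + 1); simpa using by omega

-- with enough fuel, the recursion stops only past the end or where the sign test fails
theorem pvRunB_stop (a : List Int) (sign : Int) (fuel : Nat) (j : Int)
    (hf : (a.length : Int) - j ≤ fuel) :
    (a.length : Int) ≤ (pvRunB a sign fuel j).1 ∨
      ¬ (PySem.List.pyGetD a (pvRunB a sign fuel j).1 0) * sign > 0 := by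
  induction fuel generalizing j with
  | zero => left; simp [pvRunB]; omega
  | succ f ih =>
    rw [pvRunB]
    split
    · rename_i h
      rcases h with h | h
      · left; simpa using h
      · right; simpa using not_lt.mpr h
    · simpa using ih (j + 1) (by omega)

-- A's loop equals B's recursion, with A's running max folded in:
-- pvLoopA f j m = (end, m combined with the run-max; the empty run contributes nothing).
theorem pvLoopA_eq_pvRunB (a : List Int) (sign : Int) (fuel : Nat) (j m : Int) :
    pvLoopA a sign fuel j m =
      ((pvRunB a sign fuel j).1,
        match (pvRunB a sign fuel j).2 with
        | none => m
        | some mm => if mm > m then mm else m) := by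
  induction fuel generalizing j m with
  | zero => simp [pvLoopA, pvRunB]
  | succ f ih =>
    rw [pvLoopA, pvRunB]
    by_cases hc : j < (a.length : Int) ∧ (PySem.List.pyGetD a j 0) * sign > 0
    · rw [if_pos hc, if_neg (not_or.mpr ⟨not_le.mpr hc.1, not_le.mpr hc.2⟩)]
      rw [ih]
      cases hm : (pvRunB a sign f (j + 1)).2 with
      | none => simp
      | some mm =>
        simp only [Prod.mk.injEq]
        refine ⟨by trivial, ?_⟩
        split_ifs <;> omega
    · rw [if_neg hc, if_pos (by
        by_cases h1 : j < (a.length : Int)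
        · exact Or.inr (by by_contra h2; exact hc ⟨h1, not_le.mp h2⟩)
        · exact Or.inl (not_lt.mp h1))]

-- a nonempty run's max is at least its first element
theorem pvRunB_some_ge (a : List Int) (sign : Int) (fuel : Nat) (j : Int)
    (hc : j < (a.length : Int) ∧ (PySem.List.pyGetD a j 0) * sign > 0)
    (hf : 1 ≤ fuel) :
    ∃ mm, (pvRunB a sign fuel j).2 = some mm ∧ PySem.List.pyGetD a j 0 ≤ mm := by
  obtain ⟨f, rfl⟩ : ∃ f, fuel = f + 1 := ⟨fuel - 1, by omega⟩
  rw [pvRunB, if_neg (not_or.mpr ⟨not_le.mpr hc.1, not_le.mpr hc.2⟩)]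
  cases hm : (pvRunB a sign f (j + 1)).2 with
  | none => exact ⟨_, by simp, le_refl _⟩
  | some mm =>
    refine ⟨if PySem.List.pyGetD a j 0 > mm then PySem.List.pyGetD a j 0 else mm,
      by simp, ?_⟩
    split_ifs <;> omega

theorem find_next_max_py_spec : Claim_equal_find_next_max_py := by
  intro a j sign _ hpre
  obtain ⟨hge, hlt⟩ := hpre
  unfold Spec_find_next_max_py find_next_max_py find_next_max_py_alt
  rw [pvLoopA_eq_pvRunB]
  set fuel := ((a.length : Int) - j).toNat with hfuel
  set e := (pvRunB a sign fuel j).1 with he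
  have hje : j ≤ e := pvRunB_fst_ge a sign fuel j
  have hne : a ≠ [] := by
    intro hnil; subst hnil; simp at hge hlt; omega
  -- A's "-1" branch is dead
  have hdead : ¬ (e = (a.length : Int) - 1 ∧ (PySem.List.pyGetD a (-1) 0) * sign > 0) := by
    rintro ⟨heq, hneg⟩
    rcases pvRunB_stop a sign fuel j (by omega) with hbig | hstop
    · omega
    · apply hstop
      have h1 : PySem.List.pyGetD a (-1) 0 = a.getLast hne :=
        PySem.List.pyGetD_neg_one a 0 hne
      have h2 : PySem.List.pyGetD a e 0 = a[e.toNat] :=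
        PySem.List.pyGetD_eq_getElem a 0 (by omega) (by omega)
      have h3 : a.getLast hne = a[a.length - 1] := List.getLast_eq_getElem hne
      have h4 : e.toNat = a.length - 1 := by omega
      rw [← he, h2]
      rw [h1, h3] at hneg
      simpa [h4] using hneg
  simp only [hdead, if_false]
  by_cases hc : j < (a.length : Int) ∧ (PySem.List.pyGetD a j 0) * sign > 0
  · -- nonempty run: its max is ≥ a[j], so A's init a[j] is absorbed
    obtain ⟨mm, hm, hmge⟩ := pvRunB_some_ge a sign fuel j hc (by omega)
    rw [hm]
    simp only [Prod.mk.injEq]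
    refine ⟨by trivial, ?_⟩
    split_ifs <;> omega
  · -- empty run: both sides are (j, a[j])
    have hnone : pvRunB a sign fuel j = (j, none) := by
      obtain ⟨f, hf⟩ : ∃ f, fuel = f + 1 := ⟨fuel - 1, by omega⟩
      rw [hf, pvRunB, if_pos (by
        by_cases h1 : j < (a.length : Int)
        · exact Or.inr (by by_contra h2; exact hc ⟨h1, not_le.mp h2⟩)
        · exact Or.inl (not_lt.mp h1))]
    simp [hnone]
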